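-- pv_equiv track=rewrite | github.com/matthewlucock/problems | calculator-display/python/calculator_display.py | _generate_piped_section
-- ===== SOURCE A (Python) =====
-- _SPACE = ' '
--
-- _PIPE = '|'
--
-- def _generate_piped_section(left, right, size):
--     rows = []
--
--     for _ in range(size):
--         row = _PIPE if left else _SPACE
--
--         for _ in range(size):
--             row += _SPACE
--
--         row += _PIPE if right else _SPACE
--         rows.append(row)
--
--     return rows
-- ===== SOURCE B (Python) =====
-- _SPACE = ' '
-- _PIPE = '|'
--
-- def _generate_piped_section(left, right, size):
--     row = (_PIPE if left else _SPACE) + _SPACE * size + (_PIPE if right else _SPACE)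
--     return [row] * size
-- ===== Notes on version B (the rewrite author's own statement) =====
-- stated objective: simpler
-- what changed: Builds the identical row string once by concatenation/replication and replicates the list entry size times, replacing A's nested per-row and per-character append loops.
import Mathlib
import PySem

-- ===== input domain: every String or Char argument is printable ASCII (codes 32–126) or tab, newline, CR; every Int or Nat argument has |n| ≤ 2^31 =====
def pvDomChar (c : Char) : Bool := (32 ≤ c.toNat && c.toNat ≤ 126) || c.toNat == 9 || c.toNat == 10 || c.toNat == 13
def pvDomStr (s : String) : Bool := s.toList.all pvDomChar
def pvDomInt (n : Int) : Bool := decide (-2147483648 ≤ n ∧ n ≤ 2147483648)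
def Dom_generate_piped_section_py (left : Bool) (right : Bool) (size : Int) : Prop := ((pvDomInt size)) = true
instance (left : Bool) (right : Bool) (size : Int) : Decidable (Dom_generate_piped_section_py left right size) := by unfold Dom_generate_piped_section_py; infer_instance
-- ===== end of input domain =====

-- B builds the single row string once and replicates it, replacing A's nested append loops: simpler decomposition.


-- ===== PORT A =====
-- literal transliteration: outer loop over range(size) appends rows; inner loop appends one space per step
def generate_piped_section_py (left : Bool) (right : Bool) (size : Int) : List String :=
  (PySem.List.pyRange 0 size 1).foldl (fun rows _ =>
    let row := if left then "|" else " "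
    let row := (PySem.List.pyRange 0 size 1).foldl (fun r _ => r ++ " ") row
    let row := row ++ (if right then "|" else " ")
    rows ++ [row]) []

-- ===== PORT B =====
-- row built once: side char + ' '*size + side char; result is [row]*size
def generate_piped_section_py_alt (left : Bool) (right : Bool) (size : Int) : List String :=
  let row := (if left then "|" else " ") ++ String.ofList (List.replicate size.toNat ' ') ++ (if right then "|" else " ")
  List.replicate size.toNat row

-- ===== PRECONDITION & SPEC =====
def Spec_generate_piped_section_py (left : Bool) (right : Bool) (size : Int) (out : List String) : Prop := out = generate_piped_section_py_alt left right size
instance (left : Bool) (right : Bool) (size : Int) (out : List String) : Decidable (Spec_generate_piped_section_py left right size out) := by unfold Spec_generate_piped_section_py; infer_instance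

-- ===== CLAIM (what is proved, stated in full; the proofs are below) =====
def Claim_equal_generate_piped_section_py : Prop := ∀ (left : Bool) (right : Bool) (size : Int), Dom_generate_piped_section_py left right size → Spec_generate_piped_section_py left right size (generate_piped_section_py left right size)

-- ===== LEMMAS AND PROOFS =====
theorem pv_inner_fold {α : Type} (l : List α) (s : String) :
    l.foldl (fun r _ => r ++ " ") s = s ++ String.ofList (List.replicate l.length ' ') := by
  induction l generalizing s with
  | nil => simp
  | cons a t ih =>
      simp only [List.foldl_cons, ih, List.length_cons]
      apply String.toList_injective
      simp [List.replicate_succ]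

theorem pv_outer_fold {α : Type} (l : List α) (row : String) (acc : List String) :
    l.foldl (fun rows (_ : α) => rows ++ [row]) acc = acc ++ List.replicate l.length row := by
  induction l generalizing acc with
  | nil => simp
  | cons a t ih =>
      simp only [List.foldl_cons, ih, List.length_cons, List.replicate_succ]
      simp

-- ===== VERDICT (by name: the statement is the Claim_ definition above) =====
theorem generate_piped_section_py_spec : Claim_equal_generate_piped_section_py := by
  intro left right size _
  unfold Spec_generate_piped_section_py generate_piped_section_py generate_piped_section_py_alt
  simp only [pv_outer_fold, pv_inner_fold, PySem.List.length_pyRange_one, List.nil_append,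
    Int.sub_zero]
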